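-- pv_equiv track=rewrite | github.com/VeselinKonov/Footistix | footistix/views.py | getAvrDefault
-- ===== SOURCE A (Python) =====
-- def getAvrDefault(playerDefs):
--    avrDefaults={}
--    passingDefault = 0
--    shootingDefault = 0
--    physiqueDefault = 0
--    defenseDefault = 0
--    ballSkillDefault = 0
--    counter = 0
--    counter1 = 0
--    counter2 = 0
--    counter3 = 0
--    counter4 = 0
--    for each in playerDefs:
--       if each[0]<=5 and each[1] != None:
--          counter+=1
--          passingDefault += each[1]
--       if each[0]<=12 and each[1] != None:
--          counter1+=1
--          shootingDefault += each[1]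
--       if each[0]<=18 and each[1] != None:
--          counter2+=1
--          physiqueDefault += each[1]
--       if each[0]<=22 and each[1] != None:
--          counter3+=1
--          defenseDefault += each[1]
--       if each[0]<=24 and each[1] != None:
--          counter4+=1
--          ballSkillDefault += each[1]
--    avrDefaults['passing'] = int(passingDefault/counter)
--    avrDefaults['shooting'] = int(shootingDefault/counter1)
--    avrDefaults['physique'] = int(physiqueDefault/counter2)
--    avrDefaults['defense'] = int(defenseDefault/counter3)
--    avrDefaults['ballSkill'] = int(ballSkillDefault/counter4)
--    avrDefaultsList = []
--    avrDefaultsList.append(int(passingDefault/counter))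
--    avrDefaultsList.append(int(shootingDefault/counter1))
--    avrDefaultsList.append(int(physiqueDefault/counter2))
--    avrDefaultsList.append(int(defenseDefault/counter3))
--    avrDefaultsList.append(int(ballSkillDefault/counter4))
--    return avrDefaults
-- ===== SOURCE B (Python) =====
-- def getAvrDefault(playerDefs):
--     avrDefaults = {}
--     for key, threshold in [('passing', 5), ('shooting', 12), ('physique', 18),
--                            ('defense', 22), ('ballSkill', 24)]:
--         vals = [v for k, v in playerDefs if k <= threshold and v is not None]
--         avrDefaults[key] = int(sum(vals) / len(vals))
--     return avrDefaults
-- ===== Notes on version B (the rewrite author's own statement) =====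
-- stated objective: idiomatic
-- what changed: Replaces the fused single pass over ten hand-named accumulators (plus a dead list build) with a table of (key, threshold) pairs driving five independent filtered scans, each averaging a comprehension.
import Mathlib
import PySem

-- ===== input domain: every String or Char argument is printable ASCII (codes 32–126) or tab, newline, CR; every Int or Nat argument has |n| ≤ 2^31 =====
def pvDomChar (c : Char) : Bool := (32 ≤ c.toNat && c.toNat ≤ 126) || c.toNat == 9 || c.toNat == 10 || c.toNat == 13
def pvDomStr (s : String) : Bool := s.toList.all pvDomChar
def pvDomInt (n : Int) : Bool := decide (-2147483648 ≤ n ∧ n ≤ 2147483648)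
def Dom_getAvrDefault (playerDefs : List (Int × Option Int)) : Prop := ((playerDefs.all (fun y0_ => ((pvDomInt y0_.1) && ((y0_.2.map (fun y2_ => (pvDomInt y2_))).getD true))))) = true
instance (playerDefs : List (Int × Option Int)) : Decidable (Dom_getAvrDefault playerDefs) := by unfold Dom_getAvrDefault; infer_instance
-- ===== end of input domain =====

-- B replaces A's fused one-pass ten-accumulator loop (with a dead list build) by a
-- (key, threshold) spec table driving five independent filtered scans; same cost, more idiomatic.


-- ===== PORT A =====
-- Python's `int(sum/count)` (float true division then int()) is ported as PySem.Int.truncdiv,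
-- exact while |sum|,|count| < 2^53.
def loopA : List (Int × Option Int) → Int → Int → Int → Int → Int → Int → Int → Int → Int → Int →
    Int × Int × Int × Int × Int × Int × Int × Int × Int × Int
  | [], pD, sD, phD, dD, bD, c, c1, c2, c3, c4 => (pD, sD, phD, dD, bD, c, c1, c2, c3, c4)
  | each :: rest, pD, sD, phD, dD, bD, c, c1, c2, c3, c4 =>
    let v := each.2.getD 0
    loopA rest
      (if each.1 ≤ 5 && each.2.isSome then pD + v else pD)
      (if each.1 ≤ 12 && each.2.isSome then sD + v else sD)
      (if each.1 ≤ 18 && each.2.isSome then phD + v else phD)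
      (if each.1 ≤ 22 && each.2.isSome then dD + v else dD)
      (if each.1 ≤ 24 && each.2.isSome then bD + v else bD)
      (if each.1 ≤ 5 && each.2.isSome then c + 1 else c)
      (if each.1 ≤ 12 && each.2.isSome then c1 + 1 else c1)
      (if each.1 ≤ 18 && each.2.isSome then c2 + 1 else c2)
      (if each.1 ≤ 22 && each.2.isSome then c3 + 1 else c3)
      (if each.1 ≤ 24 && each.2.isSome then c4 + 1 else c4)

def getAvrDefault (playerDefs : List (Int × Option Int)) : List (String × Int) :=
  let (pD, sD, phD, dD, bD, c, c1, c2, c3, c4) := loopA playerDefs 0 0 0 0 0 0 0 0 0 0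
  let avrDefaults : List (String × Int) :=
    [("passing", PySem.Int.truncdiv pD c),
     ("shooting", PySem.Int.truncdiv sD c1),
     ("physique", PySem.Int.truncdiv phD c2),
     ("defense", PySem.Int.truncdiv dD c3),
     ("ballSkill", PySem.Int.truncdiv bD c4)]
  -- Python also builds avrDefaultsList, which is discarded:
  let _avrDefaultsList : List Int :=
    [PySem.Int.truncdiv pD c, PySem.Int.truncdiv sD c1, PySem.Int.truncdiv phD c2,
     PySem.Int.truncdiv dD c3, PySem.Int.truncdiv bD c4]
  avrDefaults

-- ===== PORT B =====
def getAvrDefault_alt (playerDefs : List (Int × Option Int)) : List (String × Int) :=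
  [("passing", (5 : Int)), ("shooting", 12), ("physique", 18),
   ("defense", 22), ("ballSkill", 24)].map (fun kt =>
    let vals := (playerDefs.filter (fun p => p.1 ≤ kt.2 && p.2.isSome)).map (fun p => p.2.getD 0)
    (kt.1, PySem.Int.truncdiv vals.sum (vals.length : Int)))

-- ===== PRECONDITION & SPEC =====
-- Pre_ excludes exactly the inputs on which Python A raises ZeroDivisionError: those with no
-- entry having fst ≤ 5 and a non-None snd (counter = 0; B raises there too).
def Pre_getAvrDefault (playerDefs : List (Int × Option Int)) : Prop :=
  ∃ p ∈ playerDefs, p.1 ≤ 5 ∧ p.2 ≠ none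
instance (playerDefs : List (Int × Option Int)) : Decidable (Pre_getAvrDefault playerDefs) := by unfold Pre_getAvrDefault; infer_instance
def pvWitness_getAvrDefault : (List (Int × Option Int)) := [(3, some 7), (20, some 9), (30, none)]

def Spec_getAvrDefault (playerDefs : List (Int × Option Int)) (out : List (String × Int)) : Prop := out = getAvrDefault_alt playerDefs
instance (playerDefs : List (Int × Option Int)) (out : List (String × Int)) : Decidable (Spec_getAvrDefault playerDefs out) := by unfold Spec_getAvrDefault; infer_instance

-- ===== CLAIM (what is proved, stated in full; the proofs are below) =====
def Claim_equal_getAvrDefault : Prop := ∀ (playerDefs : List (Int × Option Int)), Dom_getAvrDefault playerDefs → Pre_getAvrDefault playerDefs → Spec_getAvrDefault playerDefs (getAvrDefault playerDefs)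

-- ===== LEMMAS AND PROOFS =====
def pvVals (t : Int) (l : List (Int × Option Int)) : List Int :=
  (l.filter (fun p => p.1 ≤ t && p.2.isSome)).map (fun p => p.2.getD 0)

theorem pvVals_cons (t : Int) (p : Int × Option Int) (rest : List (Int × Option Int)) :
    pvVals t (p :: rest) =
      if p.1 ≤ t && p.2.isSome then p.2.getD 0 :: pvVals t rest else pvVals t rest := by
  simp only [pvVals, List.filter_cons]
  split_ifs <;> simp_all

theorem loopA_eq (l : List (Int × Option Int)) (pD sD phD dD bD c c1 c2 c3 c4 : Int) :
    loopA l pD sD phD dD bD c c1 c2 c3 c4 =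
      (pD + (pvVals 5 l).sum, sD + (pvVals 12 l).sum, phD + (pvVals 18 l).sum,
       dD + (pvVals 22 l).sum, bD + (pvVals 24 l).sum,
       c + ((pvVals 5 l).length : Int), c1 + ((pvVals 12 l).length : Int),
       c2 + ((pvVals 18 l).length : Int), c3 + ((pvVals 22 l).length : Int),
       c4 + ((pvVals 24 l).length : Int)) := by
  induction l generalizing pD sD phD dD bD c c1 c2 c3 c4 with
  | nil => simp [loopA, pvVals]
  | cons p rest ih =>
    obtain ⟨k, v⟩ := p
    cases v with
    | none => simp [loopA, pvVals_cons, ih]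
    | some x =>
      simp only [loopA, pvVals_cons, ih, Option.isSome_some, Bool.and_true, Option.getD_some]
      split_ifs with h1 h2 h3 h4 h5 <;>
        simp only [decide_eq_true_eq] at * <;>
        simp only [List.sum_cons, List.length_cons, Prod.mk.injEq, Nat.cast_add,
          Nat.cast_one] <;>
        (try simp only [true_and, and_true]) <;>
        omega

theorem getAvrDefault_spec : Claim_equal_getAvrDefault := by
  intro l _ _
  unfold Spec_getAvrDefault getAvrDefault getAvrDefault_alt
  simp only [loopA_eq, List.map_cons, List.map_nil, zero_add]
  rfl
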